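-- pv_equiv track=rewrite | github.com/dlcks7456/decipherAutomatic | dataProcessing/dataCheck/__init__.py | check_duplicate_meta
-- ===== SOURCE A (Python) =====
-- from typing import Union, List, Tuple, Dict, Optional, Literal, Callable, Any, TypedDict
--
-- def check_duplicate_meta(original_dict: List[Dict[str, str]]) -> List[Dict[str, str]]:
--     # 각 value의 발생 횟수를 계산
--     value_count = {}
--     for value in original_dict.values():
--         if value in value_count:
--             value_count[value] += 1
--         else:
--             value_count[value] = 1
--
--     new_dict = {}
--     value_rename_count = {}
--
--     for key, value in original_dict.items():
--         # 중복된 값이 있는 경우에만 리네임 진행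
--         if value_count[value] > 1:
--             if value in value_rename_count:
--                 value_rename_count[value] += 1
--             else:
--                 value_rename_count[value] = 1
--
--             # "1_value", "2_value" 형식으로 리네임
--             new_value = f"{value_rename_count[value]}_{value}"
--         else:
--             new_value = value
--
--         new_dict[key] = new_value
--
--     return new_dict
-- ===== SOURCE B (Python) =====
-- def check_duplicate_meta(original_dict):
--     # Group keys by value (one pass), then emit renames per group,
--     # finally assemble the result in the original key order.
--     groups = {}
--     for key, value in original_dict.items():
--         groups.setdefault(value, []).append(key)
--
--     rename = {}
--     for value, keys in groups.items():
--         if len(keys) > 1: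
--             for i, key in enumerate(keys, 1):
--                 rename[key] = f"{i}_{value}"
--         else:
--             for key in keys:
--                 rename[key] = value
--
--     return {key: rename[key] for key in original_dict}
-- ===== Notes on version B (the rewrite author's own statement) =====
-- stated objective: alternative
-- what changed: B builds a value->keys grouping index in one pass and assigns the numeric prefixes group by group via enumerate, instead of A's two parallel counting dicts (a global value counter plus a running rename counter) updated while walking the items.
import Mathlib
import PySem

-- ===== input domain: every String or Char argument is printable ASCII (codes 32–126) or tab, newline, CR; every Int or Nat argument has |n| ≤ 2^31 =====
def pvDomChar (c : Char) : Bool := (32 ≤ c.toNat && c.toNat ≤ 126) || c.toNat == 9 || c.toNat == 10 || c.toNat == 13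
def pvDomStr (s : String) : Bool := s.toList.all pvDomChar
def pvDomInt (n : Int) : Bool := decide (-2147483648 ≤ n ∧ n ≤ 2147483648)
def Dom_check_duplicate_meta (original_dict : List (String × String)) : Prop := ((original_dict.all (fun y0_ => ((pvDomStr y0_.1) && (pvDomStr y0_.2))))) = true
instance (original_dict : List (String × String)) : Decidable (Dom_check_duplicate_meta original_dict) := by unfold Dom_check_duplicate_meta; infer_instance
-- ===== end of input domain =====

-- B replaces A's two parallel counting dicts by a value→keys grouping index built in one pass,
-- emitting renames group by group (objective: alternative; same output, same order).

-- ===== PORT A =====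
-- loop body of A's second pass: 'for key, value in original_dict.items(): …'
def cdmStepA (vc : PySem.Dict String Int)
    (st : PySem.Dict String String × PySem.Dict String Int) (p : String × String) :
    PySem.Dict String String × PySem.Dict String Int :=
  if vc.getD p.2 0 > 1 then
    -- value_rename_count[value] += 1  /  value_rename_count[value] = 1
    let vrc := if st.2.contains p.2 then st.2.insert p.2 (st.2.getD p.2 0 + 1)
               else st.2.insert p.2 1
    -- new_dict[key] = f"{value_rename_count[value]}_{value}"
    (st.1.insert p.1 (PySem.Int.toStr (vrc.getD p.2 0) ++ "_" ++ p.2), vrc)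
  else
    -- new_dict[key] = value
    (st.1.insert p.1 p.2, st.2)

def check_duplicate_meta (original_dict : List (String × String)) : List (String × String) :=
  -- the argument is a Python dict: its items, in insertion order with unique keys
  let items := (PySem.Dict.ofList original_dict).items
  -- value_count = {}; for value in original_dict.values(): if value in value_count: += 1 else: = 1
  let value_count : PySem.Dict String Int :=
    (items.map (·.2)).foldl
      (fun vc v => if vc.contains v then vc.insert v (vc.getD v 0 + 1) else vc.insert v 1)
      PySem.Dict.empty
  -- new_dict = {}; value_rename_count = {}; for key, value in original_dict.items(): …
  (items.foldl (cdmStepA value_count) (PySem.Dict.empty, PySem.Dict.empty)).1.items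

-- ===== PORT B =====
-- groups.setdefault(value, []).append(key)  (i.e. groups[value] = groups.get(value, []) + [key])
def cdmGroupStepB (g : PySem.Dict String (List String)) (p : String × String) :
    PySem.Dict String (List String) :=
  g.modify p.2 [] (· ++ [p.1])

-- loop body of B's second pass: 'for value, keys in groups.items(): …'
def cdmRenameStepB (r : PySem.Dict String String) (vks : String × List String) :
    PySem.Dict String String :=
  if vks.2.length > 1 then
    -- for i, key in enumerate(keys, 1): rename[key] = f"{i}_{value}"
    (vks.2.zipIdx 1).foldl
      (fun r ki => r.insert ki.1 (PySem.Int.toStr (ki.2 : Int) ++ "_" ++ vks.1)) r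
  else
    -- for key in keys: rename[key] = value
    vks.2.foldl (fun r k => r.insert k vks.1) r

def check_duplicate_meta_alt (original_dict : List (String × String)) : List (String × String) :=
  let items := (PySem.Dict.ofList original_dict).items
  let groups := items.foldl cdmGroupStepB PySem.Dict.empty
  let rename := groups.items.foldl cdmRenameStepB PySem.Dict.empty
  -- {key: rename[key] for key in original_dict}; rename holds every key of the dict,
  -- so rename[key] never raises a KeyError and the getD default is never used
  (items.foldl (fun nd p => nd.insert p.1 (rename.getD p.1 "")) PySem.Dict.empty).items

-- ===== PRECONDITION & SPEC =====
def Spec_check_duplicate_meta (original_dict : List (String × String)) (out : List (String × String)) : Prop := out = check_duplicate_meta_alt original_dict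
instance (original_dict : List (String × String)) (out : List (String × String)) : Decidable (Spec_check_duplicate_meta original_dict out) := by unfold Spec_check_duplicate_meta; infer_instance

-- ===== CLAIM (what is proved, stated in full; the proofs are below) =====
def Claim_equal_check_duplicate_meta : Prop := ∀ (original_dict : List (String × String)), Dom_check_duplicate_meta original_dict → Spec_check_duplicate_meta original_dict (check_duplicate_meta original_dict)

-- ===== LEMMAS AND PROOFS =====

-- the common specification: walk the items once, renaming a value that occurs more than
-- once overall with the running 1-based occurrence index
def cdmCnt (l : List (String × String)) (v : String) : Int := ((l.map (·.2)).count v : Int)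

def cdmSpecGo (cnt : String → Int) : List (String × String) → (String → Int) → List (String × String)
  | [], _ => []
  | p :: rest, seen =>
    if cnt p.2 > 1 then
      (p.1, PySem.Int.toStr (seen p.2 + 1) ++ "_" ++ p.2) ::
        cdmSpecGo cnt rest (fun w => if w = p.2 then seen p.2 + 1 else seen w)
    else
      (p.1, p.2) :: cdmSpecGo cnt rest seen

-- A's "if v in d: d[v] += 1 else: d[v] = 1" is one insert
lemma cdm_count_collapse (d : PySem.Dict String Int) (v : String) :
    (if d.contains v then d.insert v (d.getD v 0 + 1) else d.insert v 1) =
      d.insert v (d.getD v 0 + 1) := by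
  by_cases h : d.contains v
  · simp [h]
  · have h' : d.contains v = false := by simpa using h
    rw [PySem.Dict.getD_of_not_contains d (0 : Int) h']
    simp [h']

lemma cdm_value_count_getD (vals : List String) (v : String) :
    ((vals.foldl
        (fun vc w => if vc.contains w then vc.insert w (vc.getD w 0 + 1) else vc.insert w 1)
        PySem.Dict.empty).getD v 0) = ((vals.count v : Nat) : Int) := by
  have hf : (fun (vc : PySem.Dict String Int) w =>
        if vc.contains w then vc.insert w (vc.getD w 0 + 1) else vc.insert w 1)
      = fun vc w => vc.insert w (vc.getD w 0 + 1) := by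
    funext vc w; exact cdm_count_collapse vc w
  rw [hf, PySem.Dict.getD_foldl_insert_add_one, PySem.Dict.getD_empty]
  simp

-- invariant of A's second loop
lemma cdm_A_loop (vc : PySem.Dict String Int) (l : List (String × String)) :
    ∀ (nd : PySem.Dict String String) (vrc : PySem.Dict String Int),
      (∀ p ∈ l, nd.contains p.1 = false) → (l.map (·.1)).Nodup →
      ((l.foldl (cdmStepA vc) (nd, vrc)).1).items
        = nd.items ++ cdmSpecGo (fun v => vc.getD v 0) l (fun v => vrc.getD v 0) := by
  induction l with
  | nil => intro nd vrc _ _; simp [cdmSpecGo]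
  | cons p rest ih =>
    intro nd vrc hfresh hnodup
    have hndp : nd.contains p.1 = false := hfresh p (List.mem_cons_self ..)
    have hcons : (p.1 :: rest.map (·.1)).Nodup := by simpa using hnodup
    have hnotmem : p.1 ∉ rest.map (·.1) := (List.nodup_cons.mp hcons).1
    have hnodup' : (rest.map (·.1)).Nodup := (List.nodup_cons.mp hcons).2
    have hfresh' : ∀ w, ∀ q ∈ rest, (nd.insert p.1 w).contains q.1 = false := by
      intro w q hq
      rw [PySem.Dict.contains_insert]
      have h1 : nd.contains q.1 = false := hfresh q (List.mem_cons_of_mem _ hq)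
      have h2 : q.1 ≠ p.1 := fun he => hnotmem (he ▸ List.mem_map_of_mem hq)
      simp [h1, h2]
    simp only [List.foldl_cons, cdmStepA]
    by_cases h : vc.getD p.2 0 > 1
    · rw [if_pos h]
      simp only [cdm_count_collapse, PySem.Dict.getD_insert_self]
      rw [ih (nd.insert p.1 (PySem.Int.toStr (vrc.getD p.2 0 + 1) ++ "_" ++ p.2))
            (vrc.insert p.2 (vrc.getD p.2 0 + 1)) (hfresh' _) hnodup',
          PySem.Dict.items_insert_of_not_contains nd _ hndp]
      have hfun : (fun v => (vrc.insert p.2 (vrc.getD p.2 0 + 1)).getD v 0)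
          = fun w => if w = p.2 then vrc.getD p.2 0 + 1 else vrc.getD w 0 := by
        funext w; rw [PySem.Dict.getD_insert]
      rw [hfun]
      simp only [cdmSpecGo, if_pos h, List.append_assoc, List.singleton_append]
    · rw [if_neg h]
      rw [ih (nd.insert p.1 p.2) vrc (hfresh' _) hnodup',
          PySem.Dict.items_insert_of_not_contains nd _ hndp]
      simp only [cdmSpecGo, if_neg h, List.append_assoc, List.singleton_append]

-- what B's inner loops write for one group
def cdmAssign (vks : String × List String) : List (String × String) :=
  if vks.2.length > 1 then
    (vks.2.zipIdx 1).map (fun ki => (ki.1, PySem.Int.toStr (ki.2 : Int) ++ "_" ++ vks.1))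
  else
    vks.2.map (fun k => (k, vks.1))

lemma cdm_assign_fst (vks : String × List String) : (cdmAssign vks).map (·.1) = vks.2 := by
  unfold cdmAssign
  split
  · simpa [List.map_map, Function.comp_def] using List.zipIdx_map_fst 1 vks.2
  · simp [List.map_map, Function.comp_def]

lemma cdm_rename_items (gl : List (String × List String)) :
    ∀ (r : PySem.Dict String String),
      (gl.flatMap (·.2)).Nodup →
      (∀ k ∈ gl.flatMap (·.2), r.contains k = false) →
      (gl.foldl cdmRenameStepB r).items = r.items ++ gl.flatMap cdmAssign := by
  induction gl with
  | nil => intro r _ _; simp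
  | cons vks rest ih =>
    intro r hnd hfresh
    rw [List.flatMap_cons] at hnd hfresh
    have hnd1 : vks.2.Nodup := (List.nodup_append.mp hnd).1
    have hnd2 : (rest.flatMap (·.2)).Nodup := (List.nodup_append.mp hnd).2.1
    have hdisj : ∀ a ∈ vks.2, ∀ b ∈ rest.flatMap (·.2), a ≠ b := (List.nodup_append.mp hnd).2.2
    have hstep : (cdmRenameStepB r vks).items = r.items ++ cdmAssign vks := by
      unfold cdmRenameStepB cdmAssign
      by_cases hlen : vks.2.length > 1
      · rw [if_pos hlen, if_pos hlen]
        refine PySem.Dict.items_foldl_insert_fresh (vks.2.zipIdx 1) (fun ki => ki.1)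
          (fun ki => PySem.Int.toStr (ki.2 : Int) ++ "_" ++ vks.1) r ?_ ?_
        · intro a ha
          refine hfresh a.1 (List.mem_append_left _ ?_)
          have := List.mem_map_of_mem (f := Prod.fst) ha
          rwa [List.zipIdx_map_fst] at this
        · simpa [List.zipIdx_map_fst 1 vks.2] using hnd1
      · rw [if_neg hlen, if_neg hlen]
        refine PySem.Dict.items_foldl_insert_fresh vks.2 (fun k => k) (fun _ => vks.1) r ?_ ?_
        · intro a ha; exact hfresh a (List.mem_append_left _ ha)
        · simpa using hnd1
    have hkeys : (cdmRenameStepB r vks).keys = r.keys ++ vks.2 := by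
      simp only [PySem.Dict.keys, hstep, List.map_append, cdm_assign_fst]
    have hfresh' : ∀ k ∈ rest.flatMap (·.2), (cdmRenameStepB r vks).contains k = false := by
      intro k hkmem
      rw [PySem.Dict.contains_eq_decide_mem_keys, hkeys]
      simp only [decide_eq_false_iff_not, List.mem_append, not_or]
      constructor
      · intro hin
        have h1 := hfresh k (List.mem_append_right _ hkmem)
        rw [PySem.Dict.contains_eq_decide_mem_keys] at h1
        simp only [decide_eq_false_iff_not] at h1
        exact h1 hin
      · intro hin
        exact hdisj k hin k hkmem rfl
    rw [List.foldl_cons, ih (cdmRenameStepB r vks) hnd2 hfresh', hstep,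
        List.flatMap_cons, List.append_assoc]

lemma cdm_groups_getD (l : List (String × String)) (v : String) :
    (l.foldl cdmGroupStepB PySem.Dict.empty).getD v []
      = (l.filter (fun p => p.2 == v)).map (·.1) := by
  have h : l.foldl cdmGroupStepB PySem.Dict.empty
      = (l.map (fun p => (p.2, p.1))).foldl
          (fun d q => d.modify q.1 [] (· ++ [q.2])) PySem.Dict.empty := by
    rw [List.foldl_map]; rfl
  rw [h, PySem.Dict.getD_foldl_modify_append, PySem.Dict.getD_empty]
  simp [List.filter_map, List.map_map, Function.comp_def]

lemma cdm_groups_keys (l : List (String × String)) :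
    (l.foldl cdmGroupStepB PySem.Dict.empty).keys = PySem.Set.ofList (l.map (·.2)) := by
  have h := PySem.Dict.keys_foldl_modify_key l (fun p : String × String => p.2)
      ([] : List String) (fun _ p => (· ++ [p.1])) PySem.Dict.empty
  simpa [cdmGroupStepB, PySem.Dict.keys_empty, PySem.Set.update_nil_left] using h

lemma cdm_count_filter (l : List (String × String)) (v : String) :
    (l.map (·.2)).count v = (l.filter (fun p => p.2 == v)).length := by
  rw [List.count_eq_countP, List.countP_map]
  rw [show (l.filter (fun p => p.2 == v)).length = l.countP (fun p => p.2 == v) from by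
    induction l with
    | nil => rfl
    | cons q rest ihq => by_cases hq : q.2 == v <;> simp [hq, ihq]]
  rfl

lemma cdm_flat_nodup (l : List (String × String)) (h : (l.map (·.1)).Nodup) :
    (((l.foldl cdmGroupStepB PySem.Dict.empty).items).flatMap (·.2)).Nodup := by
  have hkeysnd : (l.foldl cdmGroupStepB PySem.Dict.empty).keys.Nodup := by
    have hn := PySem.Dict.nodup_keys_foldl_modify_key l (fun p : String × String => p.2)
        ([] : List String) (fun _ p => (· ++ [p.1])) PySem.Dict.empty
        (by rw [PySem.Dict.keys_empty]; exact List.nodup_nil)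
    simpa [cdmGroupStepB] using hn
  rw [PySem.Dict.items_eq_map_keys _ hkeysnd [], List.flatMap_map]
  refine List.nodup_flatMap.mpr ⟨?_, ?_⟩
  · intro v _
    dsimp only
    rw [cdm_groups_getD]
    have hsub : (l.filter (fun p => p.2 == v)).Sublist l := List.filter_sublist
    exact (hsub.map (fun q => q.1)).nodup h
  · refine hkeysnd.imp ?_
    intro v w hvw
    intro k hk1 hk2
    dsimp only at hk1 hk2
    rw [cdm_groups_getD] at hk1 hk2
    obtain ⟨q1, hq1f, hq1⟩ := List.mem_map.mp hk1
    obtain ⟨q2, hq2f, hq2⟩ := List.mem_map.mp hk2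
    have hv : q1.2 = v := by simpa using List.of_mem_filter hq1f
    have hw : q2.2 = w := by simpa using List.of_mem_filter hq2f
    have heq : q1 = q2 := List.inj_on_of_nodup_map h
      (List.mem_of_mem_filter hq1f) (List.mem_of_mem_filter hq2f) (hq1.trans hq2.symm)
    exact hvw (hv ▸ hw ▸ congrArg Prod.snd heq)

-- the rename dict B builds, as a function of the items list
def cdmRename (l : List (String × String)) : PySem.Dict String String :=
  ((l.foldl cdmGroupStepB PySem.Dict.empty).items).foldl cdmRenameStepB PySem.Dict.empty

lemma cdm_rename_getD (l : List (String × String)) (hk : (l.map (·.1)).Nodup)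
    (pre suf : List (String × String)) (p : String × String) (hl : l = pre ++ p :: suf) :
    (cdmRename l).getD p.1 ""
      = (if cdmCnt l p.2 > 1
         then PySem.Int.toStr (((pre.map (·.2)).count p.2 : Nat) + 1 : Int) ++ "_" ++ p.2
         else p.2) := by
  have hkeysG : (l.foldl cdmGroupStepB PySem.Dict.empty).keys.Nodup := by
    have hn := PySem.Dict.nodup_keys_foldl_modify_key l (fun p : String × String => p.2)
        ([] : List String) (fun _ p => (· ++ [p.1])) PySem.Dict.empty
        (by rw [PySem.Dict.keys_empty]; exact List.nodup_nil)
    simpa [cdmGroupStepB] using hn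
  have hF : (cdmRename l).items
      = ((l.foldl cdmGroupStepB PySem.Dict.empty).items).flatMap cdmAssign := by
    unfold cdmRename
    rw [cdm_rename_items _ PySem.Dict.empty (cdm_flat_nodup l hk)
        (fun k _ => PySem.Dict.contains_empty k)]
    rw [show (PySem.Dict.empty : PySem.Dict String String).items = [] from rfl,
        List.nil_append]
  have hkeysR : (cdmRename l).keys.Nodup := by
    have hkeq : (cdmRename l).keys
        = ((l.foldl cdmGroupStepB PySem.Dict.empty).items).flatMap (·.2) := by
      simp only [PySem.Dict.keys, hF, List.map_flatMap, cdm_assign_fst]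
    rw [hkeq]; exact cdm_flat_nodup l hk
  set ks := (l.filter (fun q => q.2 == p.2)).map (·.1) with hks
  have hvmem : (p.2, ks) ∈ (l.foldl cdmGroupStepB PySem.Dict.empty).items := by
    rw [PySem.Dict.items_eq_map_keys _ hkeysG []]
    refine List.mem_map.mpr ⟨p.2, ?_, by rw [cdm_groups_getD]⟩
    rw [cdm_groups_keys, PySem.Set.mem_ofList]
    exact List.mem_map.mpr ⟨p, by simp [hl], rfl⟩
  have hksdec : ks = (pre.filter (fun q => q.2 == p.2)).map (·.1)
      ++ p.1 :: (suf.filter (fun q => q.2 == p.2)).map (·.1) := by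
    rw [hks, hl]
    simp [List.filter_append]
  have hcntks : cdmCnt l p.2 = (ks.length : Int) := by
    unfold cdmCnt
    rw [cdm_count_filter, hks, List.length_map]
  by_cases hc : cdmCnt l p.2 > 1
  · rw [if_pos hc]
    have hlen : ks.length > 1 := by
      rw [hcntks] at hc; exact_mod_cast hc
    have hpair : (p.1, PySem.Int.toStr (((pre.map (·.2)).count p.2 : Nat) + 1 : Int) ++ "_" ++ p.2)
        ∈ cdmAssign (p.2, ks) := by
      unfold cdmAssign
      rw [if_pos hlen]
      have hcnteq : (pre.map (·.2)).count p.2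
          = ((pre.filter (fun q => q.2 == p.2)).map (·.1)).length := by
        rw [cdm_count_filter, List.length_map]
      refine List.mem_map.mpr
        ⟨(p.1, (pre.map (·.2)).count p.2 + 1), ?_, ?_⟩
      · rw [hksdec, List.zipIdx_append, List.zipIdx_cons]
        refine List.mem_append_right _ ?_
        have hidx : (pre.map (·.2)).count p.2 + 1
            = 1 + ((pre.filter (fun q => q.2 == p.2)).map (·.1)).length := by
          rw [hcnteq]; omega
        rw [hidx]
        exact List.mem_cons_self ..
      · show (p.1, PySem.Int.toStr (((pre.map (·.2)).count p.2 + 1 : Nat) : Int) ++ "_" ++ p.2)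
            = _
        norm_cast
    exact PySem.Dict.getD_of_mem_items _ (hF ▸ List.mem_flatMap.mpr ⟨(p.2, ks), hvmem, hpair⟩)
      hkeysR ""
  · rw [if_neg hc]
    have hlen : ¬ ks.length > 1 := by
      rw [hcntks] at hc
      intro hgt; exact hc (by exact_mod_cast hgt)
    have hks1 : ks = [p.1] := by
      rcases hA : (pre.filter (fun q => q.2 == p.2)).map (·.1) with _ | ⟨a, A⟩
      · rcases hB : (suf.filter (fun q => q.2 == p.2)).map (·.1) with _ | ⟨b, B⟩
        · rw [hksdec, hA, hB]; rfl
        · exfalso; apply hlen; rw [hksdec, hA, hB]; simp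
      · exfalso; apply hlen; rw [hksdec, hA]; simp
    have hpair : (p.1, p.2) ∈ cdmAssign (p.2, ks) := by
      unfold cdmAssign
      rw [if_neg hlen, hks1]
      simp
    exact PySem.Dict.getD_of_mem_items _ (hF ▸ List.mem_flatMap.mpr ⟨(p.2, ks), hvmem, hpair⟩)
      hkeysR ""

lemma cdm_B_spec (l : List (String × String)) (hk : (l.map (·.1)).Nodup) :
    ∀ (suf pre : List (String × String)) (seen : String → Int),
      l = pre ++ suf →
      (∀ w, cdmCnt l w > 1 → seen w = (((pre.map (·.2)).count w : Nat) : Int)) →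
      cdmSpecGo (cdmCnt l) suf seen
        = suf.map (fun p => (p.1, (cdmRename l).getD p.1 "")) := by
  intro suf
  induction suf with
  | nil => intro pre seen _ _; simp [cdmSpecGo]
  | cons p rest ih =>
    intro pre seen hlps hseen
    have hget := cdm_rename_getD l hk pre rest p hlps
    by_cases hc : cdmCnt l p.2 > 1
    · simp only [cdmSpecGo, if_pos hc, List.map_cons]
      rw [if_pos hc] at hget
      congr 1
      · rw [hget, hseen p.2 hc]
      · refine ih (pre ++ [p]) _ (by rw [hlps, List.append_assoc]; rfl) ?_
        intro w hw
        by_cases hwp : w = p.2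
        · subst hwp
          rw [if_pos rfl, hseen p.2 hw]
          simp [List.count_append]
        · rw [if_neg hwp, hseen w hw]
          have hne : p.2 ≠ w := fun he => hwp he.symm
          simp [List.count_append, hne]
    · simp only [cdmSpecGo, if_neg hc, List.map_cons]
      rw [if_neg hc] at hget
      congr 1
      · rw [hget]
      · refine ih (pre ++ [p]) _ (by rw [hlps, List.append_assoc]; rfl) ?_
        intro w hw
        rw [hseen w hw]
        have hwp : p.2 ≠ w := by
          intro he; subst he; exact hc hw
        simp [List.count_append, hwp]

lemma cdm_emit (l : List (String × String)) (hk : (l.map (·.1)).Nodup)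
    (r : PySem.Dict String String) :
    (l.foldl (fun nd p => nd.insert p.1 (r.getD p.1 "")) PySem.Dict.empty).items
      = l.map (fun p => (p.1, r.getD p.1 "")) := by
  have h := PySem.Dict.items_foldl_insert_fresh l (fun p => p.1)
      (fun p => r.getD p.1 "") PySem.Dict.empty
      (fun a _ => PySem.Dict.contains_empty a.1) (by simpa using hk)
  simpa using h

-- ===== VERDICT (by name: the statement is the Claim_ definition above) =====
theorem check_duplicate_meta_spec : Claim_equal_check_duplicate_meta := by
  intro d _
  show check_duplicate_meta d = check_duplicate_meta_alt d
  unfold check_duplicate_meta check_duplicate_meta_alt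
  set l := (PySem.Dict.ofList d).items with hl
  have hk : (l.map (·.1)).Nodup := by
    have hn := PySem.Dict.nodup_keys_ofList (ps := d)
    simpa [PySem.Dict.keys, hl] using hn
  rw [cdm_A_loop _ l PySem.Dict.empty PySem.Dict.empty
        (by intro p _; exact PySem.Dict.contains_empty p.1) hk,
      cdm_emit l hk]
  have hcnt : (fun v => ((l.map (·.2)).foldl
      (fun vc w => if vc.contains w then vc.insert w (vc.getD w 0 + 1) else vc.insert w 1)
      PySem.Dict.empty).getD v 0) = cdmCnt l := by
    funext v; rw [cdm_value_count_getD]; rfl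
  have hseen : (fun v => (PySem.Dict.empty : PySem.Dict String Int).getD v 0)
      = fun _ => (0 : Int) := by
    funext v; simp [PySem.Dict.getD_empty]
  rw [hcnt, hseen, cdm_B_spec l hk l [] (fun _ => 0) (by simp) (by intro w _; simp)]
  rfl
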